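-- pv_equiv track=rewrite | github.com/IbrahimMohamed9/Programming-I | Python workbook/Dictionaries workbook.py | find_len
-- ===== SOURCE A (Python) =====
-- def find_len(d):
--     return len([j for i in d.values() for j in i])
--     """
--     abbreviation for:
--
--     z = []
--     for i in d.values():
--         for j in i:
--             z.append(j)
--     m = len(z)
--     return m
--     """
-- ===== SOURCE B (Python) =====
-- def find_len(d):
--     return sum(len(v) for v in d.values())
-- ===== Notes on version B (the rewrite author's own statement) =====
-- stated objective: idiomatic
-- what changed: B sums len(v) over the dict's values instead of materializing the flattened list of all inner elements and taking its length.
import Mathlib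
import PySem

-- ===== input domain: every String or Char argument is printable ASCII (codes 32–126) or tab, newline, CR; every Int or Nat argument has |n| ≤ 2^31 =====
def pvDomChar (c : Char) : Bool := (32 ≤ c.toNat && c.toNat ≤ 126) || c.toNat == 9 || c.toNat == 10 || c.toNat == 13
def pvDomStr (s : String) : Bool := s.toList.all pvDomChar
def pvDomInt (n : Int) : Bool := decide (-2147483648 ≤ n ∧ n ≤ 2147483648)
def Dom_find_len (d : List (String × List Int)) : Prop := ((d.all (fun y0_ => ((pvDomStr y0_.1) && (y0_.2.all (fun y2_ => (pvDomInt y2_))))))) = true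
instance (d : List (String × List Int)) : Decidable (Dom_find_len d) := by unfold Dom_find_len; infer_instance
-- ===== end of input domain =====

-- ===== PORT A =====
-- flatten all values into one list, then take its length
def find_len (d : List (String × List Int)) : Int :=
  ((d.map Prod.snd).flatMap (fun i => i)).length

-- ===== PORT B =====
-- sum the lengths of the values, one fold, no flattened list
def find_len_alt (d : List (String × List Int)) : Int :=
  d.foldl (fun acc kv => acc + (kv.2.length : Int)) 0

-- ===== PRECONDITION & SPEC =====
def Spec_find_len (d : List (String × List Int)) (out : Int) : Prop := out = find_len_alt d
instance (d : List (String × List Int)) (out : Int) : Decidable (Spec_find_len d out) := by unfold Spec_find_len; infer_instance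

-- ===== CLAIM (what is proved, stated in full; the proofs are below) =====
def Claim_equal_find_len : Prop := ∀ (d : List (String × List Int)), Dom_find_len d → Spec_find_len d (find_len d)

-- ===== LEMMAS AND PROOFS =====

-- ===== VERDICT (by name: the statement is the Claim_ definition above) =====
lemma find_len_alt_acc (d : List (String × List Int)) (a : Int) :
    d.foldl (fun acc kv => acc + (kv.2.length : Int)) a
      = a + ((d.map Prod.snd).flatMap (fun i => i)).length := by
  induction d generalizing a with
  | nil => simp
  | cons x xs ih => simp [List.foldl, ih, List.flatMap]; ring

theorem find_len_spec : Claim_equal_find_len := by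
  intro d _
  unfold Spec_find_len find_len find_len_alt
  rw [find_len_alt_acc]
  simp
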